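-- pv_equiv track=rewrite | github.com/sonambharti/Interview | InfraMarket/prep/Q1MinmDay.py | min_days_optimized
-- ===== SOURCE A (Python) =====
-- def is_possible(bloomDay, day, n, k):
--     bouquets = 0
--     flowers = 0
--     for b in bloomDay:
--         if b <= day:
--             flowers += 1
--             if flowers == k:
--                 bouquets += 1
--                 flowers = 0
--         else:
--             flowers = 0
--     return bouquets >= n
--
-- def min_days_optimized(bloomDay, n, k):
--     if n * k > len(bloomDay):
--         return -1
--
--     low, high = min(bloomDay), max(bloomDay)
--     ans = -1
--
--     while low <= high:
--         mid = (low + high) // 2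
--         if is_possible(bloomDay, mid, n, k):
--             ans = mid
--             high = mid - 1
--         else:
--             low = mid + 1
--
--     return ans
-- ===== SOURCE B (Python) =====
-- def is_possible(bloomDay, day, n, k):
--     bouquets = 0
--     flowers = 0
--     for b in bloomDay:
--         if b <= day:
--             flowers += 1
--             if flowers == k:
--                 bouquets += 1
--                 flowers = 0
--         else:
--             flowers = 0
--     return bouquets >= n
--
-- def min_days_optimized(bloomDay, n, k):
--     if n * k > len(bloomDay):
--         return -1
--     for day in sorted(set(bloomDay)):
--         if is_possible(bloomDay, day, n, k):
--             return day
--     return -1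
-- ===== Notes on version B (the rewrite author's own statement) =====
-- stated objective: simpler
-- what changed: Replaces A's binary search over the numeric range [min(bloomDay), max(bloomDay)] with a linear scan of the sorted distinct bloom values that returns the first feasible one (the minimal feasible day is always a bloom value).
import Mathlib
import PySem

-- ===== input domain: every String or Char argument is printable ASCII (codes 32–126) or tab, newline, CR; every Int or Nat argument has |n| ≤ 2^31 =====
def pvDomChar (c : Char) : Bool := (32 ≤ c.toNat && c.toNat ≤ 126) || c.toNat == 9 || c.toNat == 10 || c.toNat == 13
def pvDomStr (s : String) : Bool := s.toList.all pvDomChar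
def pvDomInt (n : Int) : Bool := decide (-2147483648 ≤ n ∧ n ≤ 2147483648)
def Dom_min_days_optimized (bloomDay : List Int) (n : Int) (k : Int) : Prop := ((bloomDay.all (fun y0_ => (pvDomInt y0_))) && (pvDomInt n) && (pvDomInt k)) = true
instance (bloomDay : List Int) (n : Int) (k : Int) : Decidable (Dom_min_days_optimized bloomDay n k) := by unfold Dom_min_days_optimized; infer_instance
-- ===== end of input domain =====

-- B replaces A's binary search over the numeric range [min, max] by a linear scan of the
-- sorted distinct bloom values, returning the first feasible one; return values agree everywhere A returns.

-- ===== PORT A =====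
-- shared module helper is_possible (used verbatim by both Python versions)
def stepIP (day k : Int) (st : Int × Int) (b : Int) : Int × Int :=
  if b ≤ day then
    (if st.2 + 1 = k then (st.1 + 1, 0) else (st.1, st.2 + 1))
  else (st.1, 0)

def is_possible (bloomDay : List Int) (day : Int) (n : Int) (k : Int) : Bool :=
  let s := bloomDay.foldl (stepIP day k) (0, 0)
  decide (n ≤ s.1)

-- A's while-loop: low/high/ans state, mid = (low+high)//2; the interval shrinks each
-- iteration, so fuel = initial interval length is a pure totality guard (never exhausted)
def bsLoop (bloomDay : List Int) (n k : Int) : Nat → Int → Int → Int → Int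
  | 0, _, _, ans => ans
  | fuel + 1, low, high, ans =>
    if low ≤ high then
      let mid := PySem.Int.floordiv (low + high) 2
      if is_possible bloomDay mid n k then
        bsLoop bloomDay n k fuel low (mid - 1) mid
      else
        bsLoop bloomDay n k fuel (mid + 1) high ans
    else ans

def min_days_optimized (bloomDay : List Int) (n : Int) (k : Int) : Int :=
  if (bloomDay.length : Int) < n * k then -1
  else
    match PySem.List.min? bloomDay (fun x => x), PySem.List.max? bloomDay (fun x => x) with
    | some lo, some hi => bsLoop bloomDay n k (hi + 1 - lo).toNat lo hi (-1)
    | _, _ => -1  -- unreachable under Pre_ (Python raises ValueError on min([]))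

-- ===== PORT B =====
-- B's for-loop over sorted(set(bloomDay)): return the first feasible value, else -1
def firstFeasible (bloomDay : List Int) (n k : Int) : List Int → Int
  | [] => -1
  | d :: rest =>
      if is_possible bloomDay d n k then d else firstFeasible bloomDay n k rest

def min_days_optimized_alt (bloomDay : List Int) (n : Int) (k : Int) : Int :=
  if (bloomDay.length : Int) < n * k then -1
  else firstFeasible bloomDay n k (PySem.List.sorted (PySem.Set.ofList bloomDay) (fun x => x))

-- ===== PRECONDITION & SPEC =====
-- Pre_ excludes only the inputs where A raises ValueError: empty bloomDay with n*k <= 0 reaches min([]).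
def Pre_min_days_optimized (bloomDay : List Int) (n : Int) (k : Int) : Prop :=
  bloomDay ≠ [] ∨ 0 < n * k
instance (bloomDay : List Int) (n : Int) (k : Int) : Decidable (Pre_min_days_optimized bloomDay n k) := by unfold Pre_min_days_optimized; infer_instance

def pvWitness_min_days_optimized : List Int × Int × Int := ([1, 10, 3, 10, 2], 3, 1)

def Spec_min_days_optimized (bloomDay : List Int) (n : Int) (k : Int) (out : Int) : Prop := out = min_days_optimized_alt bloomDay n k
instance (bloomDay : List Int) (n : Int) (k : Int) (out : Int) : Decidable (Spec_min_days_optimized bloomDay n k out) := by unfold Spec_min_days_optimized; infer_instance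

-- ===== CLAIM (what is proved, stated in full; the proofs are below) =====
def Claim_equal_min_days_optimized : Prop := ∀ (bloomDay : List Int) (n : Int) (k : Int), Dom_min_days_optimized bloomDay n k → Pre_min_days_optimized bloomDay n k → Spec_min_days_optimized bloomDay n k (min_days_optimized bloomDay n k)
-- ===== LEMMAS AND PROOFS =====

-- invariant relating the greedy counter's states for two days d ≤ d'
def InvIP (k : Int) (s s' : Int × Int) : Prop :=
  s.1 ≤ s'.1 ∧ (s.1 = s'.1 → s.2 ≤ s'.2) ∧ 0 ≤ s.2 ∧ 0 ≤ s'.2 ∧ (0 < k → s.2 < k ∧ s'.2 < k)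

theorem invIP_step {d d' k : Int} (hdd : d ≤ d') (b : Int) {s s' : Int × Int}
    (h : InvIP k s s') : InvIP k (stepIP d k s b) (stepIP d' k s' b) := by
  rcases s with ⟨bq, fl⟩; rcases s' with ⟨bq', fl'⟩
  simp only [InvIP, stepIP] at *
  split_ifs <;> simp_all <;> omega

theorem invIP_fold {d d' k : Int} (hdd : d ≤ d') (L : List Int) :
    ∀ {s s' : Int × Int}, InvIP k s s' →
      InvIP k (L.foldl (stepIP d k) s) (L.foldl (stepIP d' k) s') := by
  induction L with
  | nil => intro s s' h; exact h
  | cons b t ih => intro s s' h; exact ih (invIP_step hdd b h)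

theorem is_possible_mono {L : List Int} {n k d d' : Int} (hdd : d ≤ d')
    (h : is_possible L d n k = true) : is_possible L d' n k = true := by
  have hInv : InvIP k (L.foldl (stepIP d k) (0, 0)) (L.foldl (stepIP d' k) (0, 0)) :=
    invIP_fold hdd L (by simp [InvIP])
  simp only [is_possible, decide_eq_true_eq] at *
  exact le_trans h hInv.1

-- if every bloom value is ≤ d exactly when it is ≤ w, the greedy counter cannot tell the days apart
theorem fold_stepIP_congr {k d w : Int} (L : List Int)
    (h : ∀ b ∈ L, (b ≤ d ↔ b ≤ w)) :
    ∀ s : Int × Int, L.foldl (stepIP d k) s = L.foldl (stepIP w k) s := by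
  induction L with
  | nil => intro s; rfl
  | cons b t ih =>
      intro s
      have hb := h b (by simp)
      simp only [List.foldl_cons]
      rw [show stepIP d k s b = stepIP w k s b by simp only [stepIP, hb]]
      exact ih (fun x hx => h x (by simp [hx])) _

theorem is_possible_congr {L : List Int} {n k d w : Int}
    (h : ∀ b ∈ L, (b ≤ d ↔ b ≤ w)) : is_possible L d n k = is_possible L w n k := by
  simp only [is_possible, fold_stepIP_congr L h]

-- A's loop returns ans when nothing in [low, high] is feasible
theorem bsLoop_none (L : List Int) (n k : Int) :
    ∀ (fuel : Nat) (low high ans : Int),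
      (∀ d, low ≤ d → d ≤ high → is_possible L d n k = false) →
      bsLoop L n k fuel low high ans = ans := by
  intro fuel
  induction fuel with
  | zero => intro low high ans _; rfl
  | succ m ih =>
      intro low high ans hnone
      rw [bsLoop]
      split_ifs with h
      · have hb := PySem.Int.floordiv_two_mid_bounds h
        set mid := PySem.Int.floordiv (low + high) 2 with hmid
        have hm : is_possible L mid n k = false := hnone mid hb.1 hb.2
        simp only [hm]
        simp only [Bool.false_eq_true, if_false]
        exact ih (mid + 1) high ans (fun d hd1 hd2 => hnone d (by omega) hd2)
      · rfl

-- A's loop finds v: the least feasible day at or above low₀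
theorem bsLoop_finds (L : List Int) (n k low₀ v : Int)
    (hP : is_possible L v n k = true)
    (hnP : ∀ d, low₀ ≤ d → d < v → is_possible L d n k = false) :
    ∀ (fuel : Nat) (low high ans : Int), (high + 1 - low).toNat ≤ fuel →
      low₀ ≤ low → low ≤ v → v ≤ high →
      bsLoop L n k fuel low high ans = v := by
  intro fuel
  induction fuel with
  | zero => intro low high ans hf h0 h1 h2; omega
  | succ m ih =>
      intro low high ans hf h0 h1 h2
      have h : low ≤ high := le_trans h1 h2
      rw [bsLoop]
      rw [if_pos h]
      have hb := PySem.Int.floordiv_two_mid_bounds h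
      set mid := PySem.Int.floordiv (low + high) 2 with hmid
      by_cases hm : is_possible L mid n k = true
      · simp only [hm, if_true]
        have hvm : v ≤ mid := by
          by_contra hc
          push_neg at hc
          have := hnP mid (by omega) hc
          simp [this] at hm
        rcases eq_or_lt_of_le hvm with he | hlt
        · rw [← he]
          exact bsLoop_none L n k m low (v - 1) v
            (fun d hd1 hd2 => hnP d (by omega) (by omega))
        · exact ih low (mid - 1) mid (by omega) h0 h1 (by omega)
      · simp only [hm, if_false]
        have hmv : mid < v := by
          by_contra hc
          push_neg at hc
          exact hm (is_possible_mono hc hP)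
        exact ih (mid + 1) high ans (by omega) (by omega) (by omega) h2

-- B's scan: all infeasible gives -1
theorem ff_none (L : List Int) (n k : Int) :
    ∀ S : List Int, (∀ v ∈ S, is_possible L v n k = false) →
      firstFeasible L n k S = -1 := by
  intro S
  induction S with
  | nil => intro _; rfl
  | cons u t ih =>
      intro h
      simp only [firstFeasible]
      rw [h u (by simp)]
      simp only [Bool.false_eq_true, if_false]
      exact ih (fun v hv => h v (by simp [hv]))

-- B's scan over a strictly increasing list returns the least feasible member
theorem ff_finds (L : List Int) (n k v : Int) :
    ∀ S : List Int, S.Pairwise (· < ·) → v ∈ S →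
      is_possible L v n k = true →
      (∀ u ∈ S, u < v → is_possible L u n k = false) →
      firstFeasible L n k S = v := by
  intro S
  induction S with
  | nil => intro _ hv; simp at hv
  | cons u t ih =>
      intro hpw hv hP hleast
      simp only [firstFeasible]
      by_cases hu : is_possible L u n k = true
      · simp only [hu, if_true]
        rcases List.mem_cons.mp hv with he | ht
        · omega
        · have hlt : u < v := (List.pairwise_cons.mp hpw).1 v ht
          have := hleast u (by simp) hlt
          simp [this] at hu
      · simp only [hu, if_false]
        have hne : v ≠ u := by rintro rfl; exact hu hP
        rcases List.mem_cons.mp hv with he | ht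
        · exact absurd he hne
        · exact ih (List.pairwise_cons.mp hpw).2 ht hP
            (fun x hx hxlt => hleast x (by simp [hx]) hxlt)

-- a nonempty list of ints has a greatest element
theorem exists_greatest (l : List Int) (hne : l ≠ []) : ∃ w ∈ l, ∀ u ∈ l, u ≤ w := by
  induction l with
  | nil => exact absurd rfl hne
  | cons a t ih =>
      rcases eq_or_ne t [] with rfl | ht
      · refine ⟨a, by simp, ?_⟩
        intro u hu
        have h : u = a := by simpa using hu
        omega
      · obtain ⟨w, hw, hmax⟩ := ih ht
        by_cases haw : a ≤ w
        · refine ⟨w, List.mem_cons_of_mem a hw, ?_⟩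
          intro u hu
          rcases List.mem_cons.mp hu with h | h
          · omega
          · exact hmax u h
        · refine ⟨a, by simp, ?_⟩
          intro u hu
          rcases List.mem_cons.mp hu with h | h
          · omega
          · have := hmax u h
            omega

-- ===== VERDICT (by name: the statement is the Claim_ definition above) =====
theorem min_days_optimized_spec : Claim_equal_min_days_optimized := by
  intro L n k _ hpre
  unfold Spec_min_days_optimized min_days_optimized min_days_optimized_alt
  by_cases hlen : (L.length : Int) < n * k
  · simp [hlen]
  · simp only [hlen, if_false]
    have hne : L ≠ [] := by
      rcases hpre with h | h
      · exact h
      · intro hl; subst hl; simp at hlen; omega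
    obtain ⟨lo, hlo⟩ : ∃ lo, PySem.List.min? L (fun x => x) = some lo := by
      cases hmin : PySem.List.min? L (fun x => x) with
      | none => exact absurd ((PySem.List.min?_eq_none_iff L _).mp hmin) hne
      | some lo => exact ⟨lo, rfl⟩
    obtain ⟨hi, hhi⟩ : ∃ hi, PySem.List.max? L (fun x => x) = some hi := by
      cases hmax : PySem.List.max? L (fun x => x) with
      | none => exact absurd ((PySem.List.max?_eq_none_iff L _).mp hmax) hne
      | some hi => exact ⟨hi, rfl⟩
    rw [hlo, hhi]
    show bsLoop L n k (hi + 1 - lo).toNat lo hi (-1) =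
      firstFeasible L n k (PySem.List.sorted (PySem.Set.ofList L) (fun x => x))
    have hlo_mem : lo ∈ L := PySem.List.min?_mem hlo
    have hhi_mem : hi ∈ L := PySem.List.max?_mem hhi
    have hlo_min : ∀ y ∈ L, lo ≤ y := PySem.List.min?_isMin hlo
    have hhi_max : ∀ y ∈ L, y ≤ hi := PySem.List.max?_isMax hhi
    set S := PySem.List.sorted (PySem.Set.ofList L) (fun x => x) with hS
    have hSmem : ∀ x, x ∈ S ↔ x ∈ L := by
      intro x
      rw [hS, PySem.List.mem_sorted, PySem.Set.mem_ofList]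
    have hSpw : S.Pairwise (· < ·) := PySem.List.sorted_ofList_pairwise_lt L
    by_cases hEx : ∃ v ∈ L, is_possible L v n k = true
    · -- some bloom value is feasible; let v be the least feasible bloom value
      obtain ⟨v, hvF, hv_mem, hvP, hv_min⟩ :
          ∃ v, v ∈ L.filter (fun x => is_possible L x n k) ∧ v ∈ L ∧
            is_possible L v n k = true ∧
            ∀ u ∈ L, is_possible L u n k = true → v ≤ u := by
        obtain ⟨v0, hv0, hv0P⟩ := hEx
        obtain ⟨v, hvf⟩ : ∃ v, PySem.List.min? (L.filter (fun x => is_possible L x n k)) (fun x => x) = some v := by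
          cases hmin : PySem.List.min? (L.filter (fun x => is_possible L x n k)) (fun x => x) with
          | none =>
              have := (PySem.List.min?_eq_none_iff _ _).mp hmin
              have : v0 ∈ (List.nil : List Int) := this ▸ List.mem_filter.mpr ⟨hv0, hv0P⟩
              simp at this
          | some v => exact ⟨v, rfl⟩
        have hmemf := PySem.List.min?_mem hvf
        have hminf := PySem.List.min?_isMin hvf
        obtain ⟨hvL, hvP⟩ := List.mem_filter.mp hmemf
        exact ⟨v, hmemf, hvL, by simpa using hvP,
          fun u hu huP => hminf u (List.mem_filter.mpr ⟨hu, by simpa using huP⟩)⟩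
      -- B returns v
      have hB : firstFeasible L n k S = v := by
        apply ff_finds L n k v S hSpw ((hSmem v).mpr hv_mem) hvP
        intro u hu hult
        by_contra hc
        have : is_possible L u n k = true := by
          cases h : is_possible L u n k
          · exact absurd h hc
          · rfl
        have := hv_min u ((hSmem u).mp hu) this
        omega
      -- A returns v
      have hA : bsLoop L n k (hi + 1 - lo).toNat lo hi (-1) = v := by
        apply bsLoop_finds L n k lo v hvP _ ((hi + 1 - lo).toNat) lo hi (-1) (le_refl _)
          (le_refl _) (hlo_min v hv_mem) (hhi_max v hv_mem)
        intro d hd1 hd2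
        -- take w: the greatest bloom value ≤ d (exists since lo ≤ d)
        obtain ⟨w, hwT, hwmax⟩ := exists_greatest (L.filter (fun x => decide (x ≤ d)))
          (by
            intro hnil
            have : lo ∈ (List.nil : List Int) := hnil ▸ List.mem_filter.mpr ⟨hlo_mem, by simpa using hd1⟩
            simp at this)
        obtain ⟨hwL, hwd⟩ := List.mem_filter.mp hwT
        have hwd : w ≤ d := by simpa using hwd
        have hcut : ∀ b ∈ L, (b ≤ d ↔ b ≤ w) := by
          intro b hb
          constructor
          · intro hbd
            have := hwmax b (List.mem_filter.mpr ⟨hb, by simpa using hbd⟩)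
            exact this
          · intro hbw; omega
        rw [is_possible_congr hcut]
        cases h : is_possible L w n k
        · rfl
        · have := hv_min w hwL h
          omega
      rw [hA, hB]
    · -- nothing feasible: both return -1
      push_neg at hEx
      have hnotP : ∀ v ∈ L, is_possible L v n k = false := by
        intro v hv
        cases h : is_possible L v n k
        · rfl
        · exact absurd h (by simpa using hEx v hv)
      have hB : firstFeasible L n k S = -1 :=
        ff_none L n k S (fun v hv => hnotP v ((hSmem v).mp hv))
      have hA : bsLoop L n k (hi + 1 - lo).toNat lo hi (-1) = -1 := by
        apply bsLoop_none L n k ((hi + 1 - lo).toNat) lo hi (-1)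
        intro d hd1 hd2
        cases h : is_possible L d n k
        · rfl
        · have := is_possible_mono hd2 h
          rw [hnotP hi hhi_mem] at this
          simp at this
      rw [hA, hB]
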